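-- pv_equiv track=rewrite | github.com/tborzyszkowski/PythonWyklad | ProjektyStudentow/2019_Vitaliy_Mysak/parser.py | trimSpaces
-- ===== SOURCE A (Python) =====
-- LAMBDA_DECL   = '\\'
--
-- def trimSpaces(s: str) -> str:
-- 	re = ''
-- 	last = ''
-- 	for c in s:
-- 		if c.isspace():
-- 			if last == c:
-- 				continue
-- 			elif last == LAMBDA_DECL:
-- 				last = c
-- 				continue
-- 			else:
-- 				re += ' '
-- 		else:
-- 			re += c
-- 		last = c
-- 	return re
-- ===== SOURCE B (Python) =====
-- LAMBDA_DECL = '\\'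
--
-- def trimSpaces(s: str) -> str:
--     # Run-based rewrite: scan maximal runs of identical characters with two
--     # indices; a whitespace run emits one space unless the previous run's
--     # character was a backslash; a non-whitespace run is copied whole.
--     pieces = []
--     prev = ''
--     i, n = 0, len(s)
--     while i < n:
--         ch = s[i]
--         j = i
--         while j < n and s[j] == ch:
--             j += 1
--         if ch.isspace():
--             if prev != LAMBDA_DECL:
--                 pieces.append(' ')
--         else:
--             pieces.append(ch * (j - i))
--         prev = ch
--         i = j
--     return ''.join(pieces)
-- ===== Notes on version B (the rewrite author's own statement) =====
-- stated objective: alternative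
-- what changed: B scans maximal runs of identical characters with two indices and emits one piece per run (one space per whitespace run unless the previous run was a backslash), instead of A's per-character state machine that tracks the previously handled character.
import Mathlib
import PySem

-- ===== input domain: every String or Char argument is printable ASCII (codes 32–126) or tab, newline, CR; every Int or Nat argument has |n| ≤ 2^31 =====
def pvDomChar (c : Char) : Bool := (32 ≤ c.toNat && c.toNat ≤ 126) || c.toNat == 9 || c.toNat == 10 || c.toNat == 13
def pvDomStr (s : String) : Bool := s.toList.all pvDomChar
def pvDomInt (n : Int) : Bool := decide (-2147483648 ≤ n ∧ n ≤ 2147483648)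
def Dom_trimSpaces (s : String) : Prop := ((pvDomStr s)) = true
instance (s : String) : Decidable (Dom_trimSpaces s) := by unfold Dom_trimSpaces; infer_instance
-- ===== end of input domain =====

-- B replaces A's per-character 'last'-register state machine by a run-based scan
-- (one piece emitted per maximal run of identical characters); same task, same cost.

-- ===== PORT A =====
-- state: (re, last); last is '' (none) or the last handled character (some c)
def trimSpacesStep (st : List Char × Option Char) (c : Char) : List Char × Option Char :=
  if PySem.Chars.isspace c then
    if st.2 = some c then st
    else if st.2 = some '\\' then (st.1, some c)
    else (st.1 ++ [' '], some c)
  else (st.1 ++ [c], some c)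

def trimSpaces (s : String) : String :=
  String.mk (s.toList.foldl trimSpacesStep ([], none)).1

-- ===== PORT B =====
-- one maximal run of identical characters per step: takeWhile/dropWhile play the
-- role of Source B's inner index j; 'prev' is the previous run's character
def trimSpacesRuns (prev : Option Char) (l : List Char) : List Char :=
  match l with
  | [] => []
  | c :: rest =>
      let run := rest.takeWhile (· == c)
      let rest' := rest.dropWhile (· == c)
      (if PySem.Chars.isspace c then
        (if prev = some '\\' then [] else [' '])
       else List.replicate (run.length + 1) c) ++ trimSpacesRuns (some c) rest'
termination_by l.length
decreasing_by
  simp only [List.length_cons]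
  exact Nat.lt_succ_of_le (List.length_dropWhile_le _ _)

def trimSpaces_alt (s : String) : String :=
  String.mk (trimSpacesRuns none s.toList)

-- ===== PRECONDITION & SPEC =====
def Spec_trimSpaces (s : String) (out : String) : Prop := out = trimSpaces_alt s
instance (s : String) (out : String) : Decidable (Spec_trimSpaces s out) := by unfold Spec_trimSpaces; infer_instance

-- ===== CLAIM (what is proved, stated in full; the proofs are below) =====
def Claim_equal_trimSpaces : Prop := ∀ (s : String), Dom_trimSpaces s → Spec_trimSpaces s (trimSpaces s)

-- ===== LEMMAS AND PROOFS =====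

-- A's fold over a run of copies of c, starting with last = some c
lemma foldl_step_run (run : List Char) (c : Char) (h : ∀ x ∈ run, x = c) (a : List Char) :
    run.foldl trimSpacesStep (a, some c) =
      ((if PySem.Chars.isspace c then a else a ++ run), some c) := by
  induction run generalizing a with
  | nil => simp
  | cons x xs ih =>
    have hx : x = c := h x (by simp)
    subst hx
    have h' : ∀ y ∈ xs, y = x := fun y hy => h y (by simp [hy])
    by_cases hs : PySem.Chars.isspace x
    · simp [List.foldl_cons, trimSpacesStep, hs, ih h']
    · simp [List.foldl_cons, trimSpacesStep, hs, ih h']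

lemma head_dropWhile_ne (c : Char) (l : List Char) :
    ∀ h, (l.dropWhile (· == c)).head? = some h → h ≠ c := by
  induction l with
  | nil => intro h hh; simp at hh
  | cons x xs ih =>
    intro h hh
    by_cases hx : x = c
    · exact ih h (by simpa [List.dropWhile_cons, hx] using hh)
    · rw [List.dropWhile_cons_of_neg (by simpa using hx)] at hh
      simp at hh
      exact fun hc => hx (hh ▸ hc)

lemma main_lemma : ∀ n (l : List Char), l.length ≤ n → ∀ (prev : Option Char) (a : List Char),
    (∀ h, l.head? = some h → prev ≠ some h) →
    (l.foldl trimSpacesStep (a, prev)).1 = a ++ trimSpacesRuns prev l := by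
  intro n
  induction n with
  | zero =>
    intro l hl prev a _
    have hnil : l = [] := List.length_eq_zero_iff.mp (Nat.le_zero.mp hl)
    subst hnil; simp [trimSpacesRuns]
  | succ m ih =>
    intro l hl prev a hhead
    match l with
    | [] => simp [trimSpacesRuns]
    | c :: rest =>
      have hprev : prev ≠ some c := hhead c rfl
      have hrun : ∀ x ∈ rest.takeWhile (· == c), x = c := by
        intro x hx
        have := List.mem_takeWhile_imp hx
        simpa using this
      have hsplit : rest = rest.takeWhile (· == c) ++ rest.dropWhile (· == c) :=
        (List.takeWhile_append_dropWhile).symm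
      have hlen : (rest.dropWhile (· == c)).length ≤ m := by
        have h1 := List.length_dropWhile_le (· == c) rest
        simp [List.length_cons] at hl
        omega
      have hhead' : ∀ h, (rest.dropWhile (· == c)).head? = some h → (some c : Option Char) ≠ some h := by
        intro h hh hc
        exact head_dropWhile_ne c rest h hh (by injection hc with hc; exact hc.symm)
      rw [trimSpacesRuns]
      by_cases hs : PySem.Chars.isspace c
      · have hns : c ≠ '\\' := by
          intro hc; subst hc; simp [PySem.Chars.isspace] at hs
        by_cases hb : prev = some '\\'
        · -- backslash before: whitespace run swallowed
          have step1 : trimSpacesStep (a, prev) c = (a, some c) := by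
            simp [trimSpacesStep, hs, hb]
          rw [List.foldl_cons, step1]
          conv_lhs => rw [hsplit, List.foldl_append, foldl_step_run _ c hrun a]
          simp only [hs, if_pos]
          rw [ih _ hlen (some c) a hhead']
          simp [hb]
        · have step1 : trimSpacesStep (a, prev) c = (a ++ [' '], some c) := by
            simp [trimSpacesStep, hs, hprev, hb]
          rw [List.foldl_cons, step1]
          conv_lhs => rw [hsplit, List.foldl_append, foldl_step_run _ c hrun (a ++ [' '])]
          simp only [hs, if_true]
          rw [ih _ hlen (some c) (a ++ [' ']) hhead']
          simp [hb]
      · have step1 : trimSpacesStep (a, prev) c = (a ++ [c], some c) := by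
          simp [trimSpacesStep, hs]
        rw [List.foldl_cons, step1]
        conv_lhs => rw [hsplit, List.foldl_append, foldl_step_run _ c hrun (a ++ [c])]
        simp only [hs, Bool.false_eq_true, if_false]
        rw [ih _ hlen (some c) (a ++ [c] ++ rest.takeWhile (· == c)) hhead']
        have hrep : (rest.takeWhile (· == c)) = List.replicate (rest.takeWhile (· == c)).length c :=
          List.eq_replicate_of_mem hrun
        simp only [List.append_assoc]
        congr 1
        rw [List.replicate_succ]
        simp [← hrep]

-- ===== VERDICT (by name: the statement is the Claim_ definition above) =====
theorem trimSpaces_spec : Claim_equal_trimSpaces := by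
  intro s _
  unfold Spec_trimSpaces trimSpaces trimSpaces_alt
  congr 1
  have := main_lemma s.toList.length s.toList le_rfl none [] (by intro h hh hc; cases hc)
  simpa using this
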